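-- pv_equiv track=rewrite | github.com/Pyomo/pyomo | pyomo/contrib/satsolver/satsolver.py | _compute_disjunction_string
-- ===== SOURCE A (Python) =====
-- def _compute_disjunction_string(smt_djn):
--     djn_string = smt_djn[0]
--     for disj in smt_djn[1]:
--         cons_string = "true"
--         for c in disj[1]:
--             cons_string = "(and " + cons_string + " " + c + ")"
--         djn_string = djn_string + "(assert (=> ( = 1 " + disj[0] + ") " + cons_string + "))\n"
--     return djn_string
-- ===== SOURCE B (Python) =====
-- def _compute_disjunction_string(smt_djn):
--     # Inner nesting defined top-down by recursion on the LAST constraint: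
--     # cons(cs) = "(and " + cons(cs[:-1]) + " " + cs[-1] + ")", base "true".
--     def cons(cs):
--         if not cs:
--             return "true"
--         return "(and " + cons(cs[:-1]) + " " + cs[-1] + ")"
--
--     def go(djns):
--         if not djns:
--             return ""
--         d, cs = djns[0]
--         return "(assert (=> ( = 1 " + d + ") " + cons(cs) + "))\n" + go(djns[1:])
--
--     return smt_djn[0] + go(smt_djn[1])
-- ===== Notes on version B (the rewrite author's own statement) =====
-- stated objective: alternative
-- what changed: Replaces A's two iterative accumulator loops by structural recursion: the nested '(and ...)' string is defined top-down by recursion on the last constraint (cs[:-1]/cs[-1]) instead of being grown front-to-back in a loop accumulator, and the assert lines are produced by recursion on the disjunction list instead of a running string.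
import Mathlib
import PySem

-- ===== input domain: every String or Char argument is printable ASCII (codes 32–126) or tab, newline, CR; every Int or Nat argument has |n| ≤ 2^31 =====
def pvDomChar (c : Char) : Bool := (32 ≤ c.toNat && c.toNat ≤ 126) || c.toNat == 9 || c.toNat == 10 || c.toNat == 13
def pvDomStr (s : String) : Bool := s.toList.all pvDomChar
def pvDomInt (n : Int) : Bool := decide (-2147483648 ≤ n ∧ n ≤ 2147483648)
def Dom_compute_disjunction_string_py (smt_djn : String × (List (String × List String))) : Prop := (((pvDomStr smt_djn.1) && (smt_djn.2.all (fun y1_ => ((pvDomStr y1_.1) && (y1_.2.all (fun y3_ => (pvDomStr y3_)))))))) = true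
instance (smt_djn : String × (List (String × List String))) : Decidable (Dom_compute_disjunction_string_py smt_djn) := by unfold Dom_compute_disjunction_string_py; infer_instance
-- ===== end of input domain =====

-- B replaces A's two accumulator loops by structural recursion (inner nesting built top-down by
-- recursion on the last constraint, outer assert lines by recursion on the list); same output, proved equal.
-- Both ports work on List Char (Python string concatenation = list concatenation; exact), wrapped to String at the boundary.

-- ===== PORT A =====
def compute_disjunction_string_py (smt_djn : String × (List (String × List String))) : String :=
  String.ofList <|
    smt_djn.2.foldl (fun djn_string disj =>
      let cons_string :=
        disj.2.foldl (fun s c => "(and ".toList ++ s ++ " ".toList ++ c.toList ++ ")".toList)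
          "true".toList
      djn_string ++ "(assert (=> ( = 1 ".toList ++ disj.1.toList ++ ") ".toList
        ++ cons_string ++ "))\n".toList)
    smt_djn.1.toList

-- ===== PORT B =====
-- cons(cs): "true" if empty else "(and " + cons(cs[:-1]) + " " + cs[-1] + ")"
def pvConsB : List String → List Char
  | [] => "true".toList
  | c :: cs =>
    "(and ".toList ++ pvConsB ((c :: cs).dropLast) ++ " ".toList
      ++ ((c :: cs).getLastD "").toList ++ ")".toList
termination_by cs => cs.length
decreasing_by simp [List.length_dropLast]

-- go(djns): "" if empty else line(djns[0]) + go(djns[1:])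
def pvGoB : List (String × List String) → List Char
  | [] => []
  | d :: rest =>
    "(assert (=> ( = 1 ".toList ++ d.1.toList ++ ") ".toList ++ pvConsB d.2 ++ "))\n".toList
      ++ pvGoB rest

def compute_disjunction_string_py_alt (smt_djn : String × (List (String × List String))) : String :=
  String.ofList (smt_djn.1.toList ++ pvGoB smt_djn.2)

-- ===== PRECONDITION & SPEC =====
def Spec_compute_disjunction_string_py (smt_djn : String × (List (String × List String))) (out : String) : Prop := out = compute_disjunction_string_py_alt smt_djn
instance (smt_djn : String × (List (String × List String))) (out : String) : Decidable (Spec_compute_disjunction_string_py smt_djn out) := by unfold Spec_compute_disjunction_string_py; infer_instance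

-- ===== CLAIM (what is proved, stated in full; the proofs are below) =====
def Claim_equal_compute_disjunction_string_py : Prop := ∀ (smt_djn : String × (List (String × List String))), Dom_compute_disjunction_string_py smt_djn → Spec_compute_disjunction_string_py smt_djn (compute_disjunction_string_py smt_djn)

-- ===== LEMMAS AND PROOFS =====

-- B's top-down recursion, read at a snoc: appending a last constraint wraps once more.
theorem pvConsB_snoc (cs : List String) (c : String) :
    pvConsB (cs ++ [c])
      = "(and ".toList ++ pvConsB cs ++ " ".toList ++ c.toList ++ ")".toList := by
  cases cs with
  | nil => simp [pvConsB]
  | cons a as =>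
    rw [show (a :: as) ++ [c] = a :: (as ++ [c]) from rfl, pvConsB,
      show a :: (as ++ [c]) = (a :: as) ++ [c] from rfl, List.dropLast_concat,
      List.getLastD_concat]

-- A's inner accumulator fold equals B's recursive nesting.
theorem pv_inner (cs : List String) :
    cs.foldl (fun s c => "(and ".toList ++ s ++ " ".toList ++ c.toList ++ ")".toList)
      "true".toList = pvConsB cs := by
  induction cs using List.reverseRecOn with
  | nil => simp [pvConsB]
  | append_singleton cs c ih => rw [List.foldl_append, List.foldl_cons, List.foldl_nil, ih, pvConsB_snoc]

-- A's outer accumulator fold equals the accumulator followed by B's recursive line builder.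
theorem pv_outer (djns : List (String × List String)) (acc : List Char) :
    djns.foldl (fun djn_string disj =>
      let cons_string :=
        disj.2.foldl (fun s c => "(and ".toList ++ s ++ " ".toList ++ c.toList ++ ")".toList)
          "true".toList
      djn_string ++ "(assert (=> ( = 1 ".toList ++ disj.1.toList ++ ") ".toList
        ++ cons_string ++ "))\n".toList) acc
      = acc ++ pvGoB djns := by
  induction djns generalizing acc with
  | nil => simp [pvGoB]
  | cons d rest ih =>
    rw [List.foldl_cons, ih, pvGoB, pv_inner]
    simp

-- ===== VERDICT (by name: the statement is the Claim_ definition above) =====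
theorem compute_disjunction_string_py_spec : Claim_equal_compute_disjunction_string_py := by
  unfold Claim_equal_compute_disjunction_string_py
  intro ⟨s0, djns⟩ _
  unfold Spec_compute_disjunction_string_py
  unfold compute_disjunction_string_py compute_disjunction_string_py_alt
  congr 1
  exact pv_outer djns s0.toList
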